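-- pv_equiv track=rewrite | github.com/tzhou2018/LeetCode | other/examination/glodon/09_09test03.py | de
-- ===== SOURCE A (Python) =====
-- def de(arr):
--     temp = {}
--     tempd = {}
--     for e in arr:
--         temp[e] = temp.get(e, 0) + 1
--     for k, v in temp.items():
--         if v >= 2:
--             tempd[k] = v
--     return sorted(tempd)
-- ===== SOURCE B (Python) =====
-- def de(arr):
--     seen = set()
--     dup = set()
--     for e in arr:
--         if e in seen:
--             dup.add(e)
--         else:
--             seen.add(e)
--     return sorted(dup)
-- ===== Notes on version B (the rewrite author's own statement) =====
-- stated objective: simpler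
-- what changed: Replaces the count dict plus a second filtering pass with a single pass over two sets (seen/dup) that detects each duplicate at its second occurrence; no counting and no second loop.
import Mathlib
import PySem

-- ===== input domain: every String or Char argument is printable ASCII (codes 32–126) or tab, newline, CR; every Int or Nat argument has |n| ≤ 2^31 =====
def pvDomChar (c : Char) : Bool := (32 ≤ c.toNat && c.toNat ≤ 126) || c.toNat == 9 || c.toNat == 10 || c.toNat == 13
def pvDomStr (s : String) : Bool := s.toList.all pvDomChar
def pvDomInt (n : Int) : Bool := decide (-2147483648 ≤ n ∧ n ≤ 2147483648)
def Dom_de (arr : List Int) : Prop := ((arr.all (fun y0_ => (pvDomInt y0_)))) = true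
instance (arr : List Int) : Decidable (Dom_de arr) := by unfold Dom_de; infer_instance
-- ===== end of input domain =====

-- B replaces the count-dict + filter pass with a single seen/dup two-set pass (simpler; same result).
-- ===== PORT A =====
def de (arr : List Int) : List Int :=
  let temp : PySem.Dict Int Int :=
    arr.foldl (fun d e => d.insert e (d.getD e 0 + 1)) PySem.Dict.empty
  let tempd : PySem.Dict Int Int :=
    temp.items.foldl (fun d kv => if kv.2 ≥ 2 then d.insert kv.1 kv.2 else d) PySem.Dict.empty
  PySem.List.sorted tempd.keys (fun x => x) false

-- ===== PORT B =====
def de_alt (arr : List Int) : List Int :=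
  let st : PySem.Set Int × PySem.Set Int :=
    arr.foldl (fun p e =>
      if PySem.Set.contains p.1 e then (p.1, PySem.Set.add p.2 e)
      else (PySem.Set.add p.1 e, p.2)) (PySem.Set.empty, PySem.Set.empty)
  PySem.List.sorted st.2 (fun x => x) false

-- ===== PRECONDITION & SPEC =====
def Spec_de (arr : List Int) (out : List Int) : Prop := out = de_alt arr
instance (arr : List Int) (out : List Int) : Decidable (Spec_de arr out) := by unfold Spec_de; infer_instance

-- ===== CLAIM (what is proved, stated in full; the proofs are below) =====
def Claim_equal_de : Prop := ∀ (arr : List Int), Dom_de arr → Spec_de arr (de arr)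

-- ===== LEMMAS AND PROOFS =====

-- ===== VERDICT (by name: the statement is the Claim_ definition above) =====
-- Keys of A's filtered dict: keys with value ≥ 2, in order, when the fed keys are fresh and distinct.
theorem keysA (ps : List (Int × Int)) (d : PySem.Dict Int Int)
    (hfresh : ∀ p ∈ ps, p.1 ∉ d.keys) (hnd : (ps.map Prod.fst).Nodup) :
    (ps.foldl (fun d kv => if kv.2 ≥ 2 then d.insert kv.1 kv.2 else d) d).keys
      = d.keys ++ ((ps.filter (fun kv => kv.2 ≥ 2)).map Prod.fst) := by
  induction ps generalizing d with
  | nil => simp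
  | cons p ps ih =>
    simp only [List.map_cons, List.nodup_cons] at hnd
    have hpd : p.1 ∉ d.keys := hfresh p (by simp)
    simp only [List.foldl_cons, List.filter_cons]
    by_cases h2 : p.2 ≥ 2
    · simp only [h2, if_true, decide_eq_true_eq]
      rw [ih (d.insert p.1 p.2) ?fresh hnd.2]
      · rw [PySem.Dict.keys_insert_of_not_contains d p.2
          (by simp [PySem.Dict.contains_eq_decide_mem_keys, hpd])]
        simp
      case fresh =>
        intro q hq
        simp only [PySem.Dict.mem_keys_insert, not_or]
        exact ⟨fun h => hnd.1 (h ▸ List.mem_map_of_mem hq), hfresh q (by simp [hq])⟩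
    · simp only [h2, if_false, decide_eq_true_eq]
      exact ih d (fun q hq => hfresh q (by simp [hq])) hnd.2

-- B's loop invariant: dup stays duplicate-free and holds exactly the already-detected duplicates.
theorem B_inv (l : List Int) (s d : PySem.Set Int) (hs : s.Nodup) (hd : d.Nodup) :
    let r := l.foldl (fun p e =>
      if PySem.Set.contains p.1 e then (p.1, PySem.Set.add p.2 e)
      else (PySem.Set.add p.1 e, p.2)) (s, d)
    r.2.Nodup ∧ ∀ x, x ∈ r.2 ↔ x ∈ d ∨ (x ∈ s ∧ x ∈ l) ∨ 2 ≤ l.count x := by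
  induction l generalizing s d with
  | nil => simp [hd]
  | cons e l ih =>
    simp only [List.foldl_cons]
    by_cases he : PySem.Set.contains s e
    · simp only [he, if_true]
      have hse : e ∈ s := (PySem.Set.contains_iff s e).mp he
      obtain ⟨hnd, hmem⟩ := ih s (PySem.Set.add d e) hs (PySem.Set.nodup_add d e hd)
      refine ⟨hnd, fun x => ?_⟩
      rw [hmem x, PySem.Set.mem_add]
      by_cases hx : x = e
      · subst hx
        simp [hse]
      · simp [hx, Ne.symm hx, List.mem_cons]
    · rw [if_neg he]
      have hse : e ∉ s := fun h => he ((PySem.Set.contains_iff s e).mpr h)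
      obtain ⟨hnd, hmem⟩ := ih (PySem.Set.add s e) d (PySem.Set.nodup_add s e hs) hd
      refine ⟨hnd, fun x => ?_⟩
      rw [hmem x, PySem.Set.mem_add]
      by_cases hx : x = e
      · subst hx
        simp only [List.mem_cons, List.count_cons_self]
        constructor
        · rintro (h | ⟨-, h2⟩ | h)
          · exact Or.inl h
          · exact Or.inr (Or.inr (by have := List.count_pos_iff.mpr h2; omega))
          · exact Or.inr (Or.inr (by omega))
        · rintro (h | ⟨h1, -⟩ | h)
          · exact Or.inl h
          · exact absurd h1 hse
          · have h2 : x ∈ l := List.count_pos_iff.mp (by omega)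
            exact Or.inr (Or.inl ⟨Or.inr trivial, h2⟩)
      · simp [hx, Ne.symm hx, List.mem_cons]

theorem de_spec : Claim_equal_de := by
  intro arr _
  unfold Spec_de de de_alt
  simp only []
  rw [PySem.Dict.foldl_insert_getD_add_one_eq_counter, PySem.Dict.items_counter]
  rw [keysA _ _ (by simp [PySem.Dict.keys, PySem.Dict.empty]) (by
    rw [List.map_map]
    show (List.map (fun k => k) (PySem.Set.ofList arr)).Nodup
    rw [List.map_id']
    exact PySem.Set.nodup_ofList arr)]
  simp only [PySem.Dict.keys_empty, List.nil_append]
  rw [List.filter_map, List.map_map]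
  obtain ⟨hnd, hmem⟩ := B_inv arr PySem.Set.empty PySem.Set.empty List.nodup_nil List.nodup_nil
  have hcomp : (Prod.fst ∘ fun k => (k, (arr.count k : Int))) = id := rfl
  rw [hcomp, List.map_id]
  apply PySem.List.sorted_eq_sorted_of_perm _ _ _ (fun a b h => h)
  rw [List.perm_ext_iff_of_nodup ((PySem.Set.nodup_ofList arr).filter _) hnd]
  intro x
  rw [List.mem_filter, hmem x, PySem.Set.mem_ofList]
  simp only [PySem.Set.empty, List.not_mem_nil, false_and, false_or, Function.comp,
    decide_eq_true_eq, ge_iff_le]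
  constructor
  · rintro ⟨-, h2⟩
    exact_mod_cast h2
  · intro h2
    exact ⟨List.count_pos_iff.mp (by omega), by exact_mod_cast h2⟩
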